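-- pv_equiv track=rewrite | github.com/naomiejio/naomiii | Passcode_problem.py | check_vowels
-- ===== SOURCE A (Python) =====
-- def check_vowels(pass_code, vowels, word):
--
--     count = 0
--     for each in word:
--         if each == " ":
--             count = -1
--         elif each in vowels:
--             pass_code = pass_code + str(count)
--         count = count + 1
--
--     return pass_code
-- ===== SOURCE B (Python) =====
-- def check_vowels(pass_code, vowels, word):
--     for segment in word.split(" "):
--         for i, ch in enumerate(segment):
--             if ch in vowels:
--                 pass_code = pass_code + str(i)
--     return pass_code
-- ===== Notes on version B (the rewrite author's own statement) =====
-- stated objective: simpler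
-- what changed: Replaces the running sentinel counter (set to -1 on spaces, incremented every char) with split(" ") into segments and enumerate-based per-segment 0-based indexing.
import Mathlib
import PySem

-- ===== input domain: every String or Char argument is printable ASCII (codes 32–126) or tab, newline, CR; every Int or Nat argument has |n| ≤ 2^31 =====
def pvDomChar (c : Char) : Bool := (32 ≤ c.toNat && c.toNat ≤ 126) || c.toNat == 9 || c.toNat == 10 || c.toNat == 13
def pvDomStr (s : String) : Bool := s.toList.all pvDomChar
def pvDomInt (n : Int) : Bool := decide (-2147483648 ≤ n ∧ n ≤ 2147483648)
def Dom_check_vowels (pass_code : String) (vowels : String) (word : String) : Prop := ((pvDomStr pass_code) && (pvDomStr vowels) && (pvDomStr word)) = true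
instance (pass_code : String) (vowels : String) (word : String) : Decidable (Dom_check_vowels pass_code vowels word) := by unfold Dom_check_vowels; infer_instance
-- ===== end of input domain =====

-- B replaces A's running counter (reset to -1 on spaces) with split(" ") plus per-segment
-- enumerate indexing — simpler decomposition, same cost.

-- ===== PORT A =====
-- state = (pass_code, count); on ' ' count is set to -1 and then incremented to 0 at the end
-- of the loop body, so the stored state after a space is -1 + 1.
def check_vowels (pass_code : String) (vowels : String) (word : String) : String :=
  String.ofList
    (word.toList.foldl
      (fun (st : List Char × Int) (each : Char) =>
        if each == ' ' then (st.1, (-1 : Int) + 1)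
        else if PySem.Chars.isIn [each] vowels.toList then
          (st.1 ++ (PySem.Int.toStr st.2).toList, st.2 + 1)
        else (st.1, st.2 + 1))
      (pass_code.toList, (0 : Int))).1

-- ===== PORT B =====
-- word.split(" ") with an explicit single-space separator (keeps empty segments), then
-- for each segment enumerate its characters and append str(i) at each vowel.
def check_vowels_alt (pass_code : String) (vowels : String) (word : String) : String :=
  String.ofList
    ((PySem.Chars.splitOn word.toList [' ']).foldl
      (fun (pc : List Char) (segment : List Char) =>
        (PySem.List.enumerate segment 0).foldl
          (fun (pc : List Char) (p : Int × Char) =>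
            if PySem.Chars.isIn [p.2] vowels.toList then pc ++ (PySem.Int.toStr p.1).toList
            else pc)
          pc)
      pass_code.toList)

-- ===== PRECONDITION & SPEC =====
def Spec_check_vowels (pass_code : String) (vowels : String) (word : String) (out : String) : Prop := out = check_vowels_alt pass_code vowels word
instance (pass_code : String) (vowels : String) (word : String) (out : String) : Decidable (Spec_check_vowels pass_code vowels word out) := by unfold Spec_check_vowels; infer_instance

-- ===== CLAIM (what is proved, stated in full; the proofs are below) =====
def Claim_equal_check_vowels : Prop := ∀ (pass_code : String) (vowels : String) (word : String), Dom_check_vowels pass_code vowels word → Spec_check_vowels pass_code vowels word (check_vowels pass_code vowels word)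

-- ===== LEMMAS AND PROOFS =====

-- A's loop step, named (definitionally equal to the lambda in the port of A).
def stepA (vowels : List Char) (st : List Char × Int) (each : Char) : List Char × Int :=
  if each == ' ' then (st.1, (-1 : Int) + 1)
  else if PySem.Chars.isIn [each] vowels then
    (st.1 ++ (PySem.Int.toStr st.2).toList, st.2 + 1)
  else (st.1, st.2 + 1)

-- B's inner step and per-segment fold, named.
def innerB (vowels : List Char) (pc : List Char) (p : Int × Char) : List Char :=
  if PySem.Chars.isIn [p.2] vowels then pc ++ (PySem.Int.toStr p.1).toList else pc

def segB (vowels : List Char) (pc : List Char) (seg : List Char) (s : Int) : List Char :=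
  (PySem.List.enumerate seg s).foldl (innerB vowels) pc

-- simple recursive characterisation of splitting on a single space
def sp : List Char → List (List Char)
  | [] => [[]]
  | c :: rest =>
    if c = ' ' then [] :: sp rest
    else
      match sp rest with
      | [] => [[c]]
      | h :: t => (c :: h) :: t

theorem sp_ne_nil (l : List Char) : sp l ≠ [] := by
  cases l with
  | nil => simp [sp]
  | cons c rest =>
    simp only [sp]
    split
    · simp
    · cases h : sp rest <;> simp

theorem sp_head_tail (l : List Char) : (sp l).head! :: (sp l).tail = sp l := by
  cases hs : sp l with
  | nil => exact absurd hs (sp_ne_nil l)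
  | cons hd tl => simp [List.head!]

theorem go_eq_sp (fuel : Nat) : ∀ (l cur : List Char) (acc : List (List Char)),
    l.length < fuel →
    PySem.Chars.splitOn.go [' '] fuel l cur acc =
      acc.reverse ++ (cur.reverse ++ (sp l).head!) :: (sp l).tail := by
  induction fuel with
  | zero => intro l cur acc h; omega
  | succ fuel ih =>
    intro l cur acc h
    cases l with
    | nil => simp [PySem.Chars.splitOn.go, sp]
    | cons c rest =>
      by_cases hc : c = ' '
      · subst hc
        have hpre : List.isPrefixOf [' '] (' ' :: rest) = true := by
          simp [List.isPrefixOf]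
        simp only [PySem.Chars.splitOn.go, hpre, if_pos, List.length_cons, List.length_nil,
          List.drop_succ_cons, List.drop_zero]
        rw [ih rest [] (cur.reverse :: acc) (by simpa using Nat.lt_of_succ_lt_succ h)]
        simp [sp, sp_head_tail]
      · have hpre : List.isPrefixOf [' '] (c :: rest) = false := by
          simp [List.isPrefixOf]; exact fun h => hc h.symm
        simp only [PySem.Chars.splitOn.go, hpre, Bool.false_eq_true, if_false]
        rw [ih rest (c :: cur) acc (by simpa using Nat.lt_of_succ_lt_succ h)]
        simp only [sp, hc, if_false]
        cases hs : sp rest with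
        | nil => exact absurd hs (sp_ne_nil rest)
        | cons hd tl => simp

theorem splitOn_space (l : List Char) : PySem.Chars.splitOn l [' '] = sp l := by
  unfold PySem.Chars.splitOn
  rw [go_eq_sp (l.length + 1) l [] [] (by omega)]
  cases hs : sp l with
  | nil => exact absurd hs (sp_ne_nil l)
  | cons hd tl => simp

theorem segB_nil (vowels pc : List Char) (s : Int) : segB vowels pc [] s = pc := by
  simp [segB, PySem.List.enumerate_nil]

theorem segB_cons (vowels pc : List Char) (c : Char) (seg : List Char) (s : Int) :
    segB vowels pc (c :: seg) s = segB vowels (innerB vowels pc (s, c)) seg (s + 1) := by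
  simp [segB, PySem.List.enumerate_cons]

-- the heart: A's fold from counter i equals B's per-segment folds, with the first
-- (partially consumed) segment enumerated from i
theorem main_lemma (vowels : List Char) : ∀ (l pc : List Char) (i : Nat),
    (l.foldl (stepA vowels) (pc, (i : Int))).1 =
      ((sp l).tail).foldl (fun pc seg => segB vowels pc seg 0) (segB vowels pc (sp l).head! i) := by
  intro l
  induction l with
  | nil => intro pc i; simp [sp, segB_nil]
  | cons c rest ih =>
    intro pc i
    by_cases hc : c = ' '
    · subst hc
      have h1 : stepA vowels (pc, (i : Int)) ' ' = (pc, ((0 : Nat) : Int)) := by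
        simp [stepA]
      rw [List.foldl_cons, h1, ih pc 0]
      simp only [sp]
      cases hs : sp rest with
      | nil => exact absurd hs (sp_ne_nil rest)
      | cons hd tl =>
        simp [segB_nil, List.foldl_cons]
    · have hceq : (c == ' ') = false := by simp [hc]
      have h1 : stepA vowels (pc, (i : Int)) c =
          (innerB vowels pc ((i : Int), c), ((i + 1 : Nat) : Int)) := by
        simp only [stepA, innerB, hceq, Bool.false_eq_true, if_false]
        split <;> push_cast <;> simp
      rw [List.foldl_cons, h1, ih _ (i + 1)]
      simp only [sp, hc, if_false]
      cases hs : sp rest with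
      | nil => exact absurd hs (sp_ne_nil rest)
      | cons hd tl =>
        simp only [List.tail_cons, List.head!]
        rw [segB_cons]
        push_cast
        rfl

-- ===== VERDICT (by name: the statement is the Claim_ definition above) =====
theorem check_vowels_spec : Claim_equal_check_vowels := by
  intro pass_code vowels word _
  unfold Spec_check_vowels check_vowels check_vowels_alt
  rw [splitOn_space]
  have h := main_lemma vowels.toList word.toList pass_code.toList 0
  norm_num at h
  rw [show (word.toList.foldl
      (fun (st : List Char × Int) (each : Char) =>
        if each == ' ' then (st.1, (-1 : Int) + 1)
        else if PySem.Chars.isIn [each] vowels.toList then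
          (st.1 ++ (PySem.Int.toStr st.2).toList, st.2 + 1)
        else (st.1, st.2 + 1))
      (pass_code.toList, (0 : Int))) = word.toList.foldl (stepA vowels.toList) (pass_code.toList, (0 : Int)) from rfl]
  rw [h]
  cases hs : sp word.toList with
  | nil => exact absurd hs (sp_ne_nil word.toList)
  | cons hd tl =>
    simp only [List.tail_cons, List.head!, List.foldl_cons]
    rfl
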